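-- pv_equiv track=rewrite | github.com/WildStriker/advent_of_code_2023 | advent_of_code/day_09/puzzle/sequence.py | get_next_diff_sequence
-- ===== SOURCE A (Python) =====
-- from typing import List
--
-- def get_next_diff_sequence(values: List[int], inverse: bool) -> List[int]:
--     """gets the next sequence of diffs
--
--     Args:
--         values (List[int]): input values to start from
--         inverse (bool): if inversed, return the first set of diffs instead of the last
--
--     Returns:
--         List[int]: list of all diffs in the sequence
--     """
--     diffs = []
--     all_zero = True
--     for previous_index, value in enumerate(values[1:]):
--         diff = value - values[previous_index]
--         diffs.append(diff)
--         if diff != 0: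
--             all_zero = False
--
--     if not all_zero:
--
--         if inverse:
--             diff = diffs[0]
--         else:
--             diff = diffs[-1]
--
--         return [diff, *get_next_diff_sequence(diffs, inverse)]
--
--     return [0,]
-- ===== SOURCE B (Python) =====
-- def get_next_diff_sequence(values, inverse):
--     """Iterative re-implementation: walk the finite-difference table with an
--     explicit loop and accumulator instead of recursion + list splatting."""
--     current = values
--     result = []
--     while True:
--         diffs = [b - a for a, b in zip(current, current[1:])]
--         if all(d == 0 for d in diffs):
--             result.append(0)
--             return result
--         result.append(diffs[0] if inverse else diffs[-1])
--         current = diffs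
-- ===== Notes on version B (the rewrite author's own statement) =====
-- stated objective: alternative
-- what changed: Replaced A's recursion that rebuilds the tail list with [diff, *rec] at every level by an explicit iterative loop that keeps the current difference row and appends each level's endpoint to a single accumulator list.
import Mathlib
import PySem

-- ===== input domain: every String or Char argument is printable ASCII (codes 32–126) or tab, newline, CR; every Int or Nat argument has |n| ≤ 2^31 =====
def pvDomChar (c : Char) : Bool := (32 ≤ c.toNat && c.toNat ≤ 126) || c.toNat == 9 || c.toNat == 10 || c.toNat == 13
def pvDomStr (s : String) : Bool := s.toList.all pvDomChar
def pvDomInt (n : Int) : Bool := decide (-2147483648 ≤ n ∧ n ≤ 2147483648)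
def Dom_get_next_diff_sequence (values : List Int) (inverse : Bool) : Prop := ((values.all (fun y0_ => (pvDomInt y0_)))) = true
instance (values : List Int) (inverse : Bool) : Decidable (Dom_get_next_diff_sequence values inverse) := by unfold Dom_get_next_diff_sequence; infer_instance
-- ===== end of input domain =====

-- B replaces A's recursion-with-splat by an explicit loop with an accumulator (alternative decomposition, same result).

-- ===== PORT A =====
-- A's enumerate-loop computing (diffs, all_zero)
def pvDiffFold (values : List Int) : List Int × Bool :=
  (PySem.List.enumerate (PySem.List.slice values (some 1) none)).foldl
    (fun (st : List Int × Bool) p =>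
      let diff := p.2 - PySem.List.pyGetD values p.1 0
      (st.1 ++ [diff], if diff ≠ 0 then false else st.2))
    ([], true)

-- the next lemmas characterise pvDiffFold; they must precede port A because its
-- decreasing_by cites pvDiffFold_len_lt by name
theorem pvFoldG (ds : List Int) : ∀ (acc : List Int) (b : Bool),
    ds.foldl (fun (st : List Int × Bool) d => (st.1 ++ [d], if d ≠ 0 then false else st.2)) (acc, b)
      = (acc ++ ds, b && ds.all (fun d => d == 0)) := by
  induction ds with
  | nil => simp
  | cons d ds ih =>
    intro acc b
    simp only [List.foldl_cons, ih, List.all_cons]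
    by_cases hd : d = 0 <;> simp [hd]

theorem pvEnumMap (values : List Int) :
    (PySem.List.enumerate values.tail).map (fun p => p.2 - PySem.List.pyGetD values p.1 0)
      = List.zipWith (fun a b => b - a) values values.tail := by
  apply List.ext_getElem
  · simp
  · intro k h1 h2
    have hk : k < values.length := by simp at h2; omega
    simp [PySem.List.getElem_enumerate, List.getElem_zipWith, List.getElem?_eq_getElem hk]

theorem pvDiffFold_eq (values : List Int) :
    pvDiffFold values =
      (List.zipWith (fun a b => b - a) values values.tail,
       (List.zipWith (fun a b => b - a) values values.tail).all (fun d => d == 0)) := by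
  unfold pvDiffFold
  rw [PySem.List.slice_from_one]
  rw [← List.foldl_map (f := fun (p : Int × Int) => p.2 - PySem.List.pyGetD values p.1 0)
        (g := fun (st : List Int × Bool) d => (st.1 ++ [d], if d ≠ 0 then false else st.2)),
      pvEnumMap, pvFoldG]
  simp

theorem pvDiffFold_len_lt (values : List Int) (h : (pvDiffFold values).2 = false) :
    (pvDiffFold values).1.length < values.length := by
  rw [pvDiffFold_eq] at h ⊢
  simp only [List.all_eq_false] at h
  obtain ⟨x, hx, -⟩ := h
  have h0 : 0 < (List.zipWith (fun (a b : Int) => b - a) values values.tail).length :=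
    List.length_pos_of_ne_nil (List.ne_nil_of_mem hx)
  simp at h0 ⊢
  omega

def get_next_diff_sequence (values : List Int) (inverse : Bool) : List Int :=
  let st := pvDiffFold values
  if st.2 = false then
    let diff := if inverse then PySem.List.pyGetD st.1 0 0 else PySem.List.pyGetD st.1 (-1) 0
    diff :: get_next_diff_sequence st.1 inverse
  else [0]
termination_by values.length
decreasing_by exact pvDiffFold_len_lt values (by assumption)

-- ===== PORT B =====
def pvAltLoop (current : List Int) (inverse : Bool) (result : List Int) : List Int :=
  let diffs := List.zipWith (fun a b => b - a) current (current.drop 1)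
  if diffs.all (fun d => d == 0) then result ++ [0]
  else pvAltLoop diffs inverse
        (result ++ [if inverse then PySem.List.pyGetD diffs 0 0 else PySem.List.pyGetD diffs (-1) 0])
termination_by current.length
decreasing_by
  rename_i h
  have hne : List.zipWith (fun (a b : Int) => b - a) current (current.drop 1) ≠ [] := by
    intro hnil
    exact h (by simp only [diffs, hnil, List.all_nil])
  have hlen : (List.zipWith (fun (a b : Int) => b - a) current (current.drop 1)).length
      = min current.length (current.length - 1) := by simp
  have := List.length_pos_of_ne_nil hne
  omega

def get_next_diff_sequence_alt (values : List Int) (inverse : Bool) : List Int :=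
  pvAltLoop values inverse []

-- ===== PRECONDITION & SPEC =====
def Spec_get_next_diff_sequence (values : List Int) (inverse : Bool) (out : List Int) : Prop := out = get_next_diff_sequence_alt values inverse
instance (values : List Int) (inverse : Bool) (out : List Int) : Decidable (Spec_get_next_diff_sequence values inverse out) := by unfold Spec_get_next_diff_sequence; infer_instance

-- ===== CLAIM (what is proved, stated in full; the proofs are below) =====
def Claim_equal_get_next_diff_sequence : Prop := ∀ (values : List Int) (inverse : Bool), Dom_get_next_diff_sequence values inverse → Spec_get_next_diff_sequence values inverse (get_next_diff_sequence values inverse)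

-- ===== LEMMAS AND PROOFS =====

theorem pvAltLoop_eq (n : Nat) : ∀ (values : List Int) (inverse : Bool) (acc : List Int),
    values.length ≤ n →
    pvAltLoop values inverse acc = acc ++ get_next_diff_sequence values inverse := by
  induction n with
  | zero =>
    intro v inv acc h
    have hv : v = [] := by cases v <;> simp_all
    subst hv
    rw [pvAltLoop, get_next_diff_sequence]
    simp [pvDiffFold_eq]
  | succ n ih =>
    intro v inv acc h
    rw [pvAltLoop, get_next_diff_sequence]
    simp only [pvDiffFold_eq, List.drop_one]
    by_cases hz : (List.zipWith (fun a b => b - a) v v.tail).all (fun d => d == 0)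
    · simp [hz]
    · have hne : List.zipWith (fun (a b : Int) => b - a) v v.tail ≠ [] := by
        intro hnil; simp [hnil] at hz
      have hlen : (List.zipWith (fun (a b : Int) => b - a) v v.tail).length
          = min v.length (v.length - 1) := by simp
      have hpos := List.length_pos_of_ne_nil hne
      rw [ih _ inv _ (by omega)]
      simp [hz]

-- ===== VERDICT (by name: the statement is the Claim_ definition above) =====
theorem get_next_diff_sequence_spec : Claim_equal_get_next_diff_sequence := by
  intro values inverse _
  unfold Spec_get_next_diff_sequence get_next_diff_sequence_alt
  simpa using (pvAltLoop_eq values.length values inverse [] le_rfl).symm
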